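-- pv_equiv track=rewrite | github.com/prototact/advent-of-code-solutions | 2019/day12/main.py | compute_accels
-- ===== SOURCE A (Python) =====
-- from itertools import combinations, chain
--
-- Coords = tuple[int, int, int]
--
-- def compute_accels(planets: list[Coords]) -> list[Coords]:
--     accels: list[Coords] = []
--     for idx, planet in enumerate(planets):
--         x_left, y_left, z_left = planet
--         accel_x, accel_y, accel_z = (0, 0, 0)
--         for other in chain(planets[:idx], planets[idx + 1 :]):
--             x_right, y_right, z_right = other
--             if x_left < x_right:
--                 accel_x += 1
--             elif x_left > x_right:
--                 accel_x -= 1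
--             if y_left < y_right:
--                 accel_y += 1
--             elif y_left > y_right:
--                 accel_y -= 1
--             if z_left < z_right:
--                 accel_z += 1
--             elif z_left > z_right:
--                 accel_z -= 1
--         accels.append((accel_x, accel_y, accel_z))
--     return accels
-- ===== SOURCE B (Python) =====
-- from itertools import groupby
--
-- Coords = tuple[int, int, int]
--
-- def _axis_accel(vals: list[int]) -> dict[int, int]:
--     # value -> (count of strictly greater) - (count of strictly less),
--     # read off group positions in one pass over the sorted values
--     n = len(vals)
--     g: dict[int, int] = {}
--     i = 0
--     for v, run in groupby(sorted(vals)):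
--         j = i + sum(1 for _ in run)
--         g[v] = (n - j) - i
--         i = j
--     return g
--
-- def compute_accels(planets: list[Coords]) -> list[Coords]:
--     gx = _axis_accel([p[0] for p in planets])
--     gy = _axis_accel([p[1] for p in planets])
--     gz = _axis_accel([p[2] for p in planets])
--     return [(gx[x], gy[y], gz[z]) for x, y, z in planets]
-- ===== Notes on version B (the rewrite author's own statement) =====
-- stated objective: faster
-- what changed: Replaces the all-pairs sign comparison per planet by sorting each axis once and reading each value's (count greater - count less) off its group's position in the sorted list, stored in a per-axis dict.
import Mathlib
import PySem

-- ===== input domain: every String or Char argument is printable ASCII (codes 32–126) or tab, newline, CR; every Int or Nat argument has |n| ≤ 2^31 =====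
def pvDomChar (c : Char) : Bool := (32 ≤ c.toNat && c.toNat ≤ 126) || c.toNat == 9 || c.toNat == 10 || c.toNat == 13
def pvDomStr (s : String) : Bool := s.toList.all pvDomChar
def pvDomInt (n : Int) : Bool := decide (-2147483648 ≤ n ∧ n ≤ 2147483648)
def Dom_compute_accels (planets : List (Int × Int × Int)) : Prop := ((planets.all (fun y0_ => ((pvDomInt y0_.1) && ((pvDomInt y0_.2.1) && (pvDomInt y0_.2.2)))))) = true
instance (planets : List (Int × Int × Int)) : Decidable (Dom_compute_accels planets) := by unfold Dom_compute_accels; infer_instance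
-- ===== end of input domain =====

-- B sorts each axis once and reads (count greater - count less) off group positions, instead of A's all-pairs comparison; measured faster (asymptotic).


-- ===== PORT A =====
-- one step of A's inner loop body (the three if/elif pairs)
def pvStepA (planet : Int × Int × Int) (a : Int × Int × Int) (other : Int × Int × Int) : Int × Int × Int :=
  (if planet.1 < other.1 then a.1 + 1 else if planet.1 > other.1 then a.1 - 1 else a.1,
   if planet.2.1 < other.2.1 then a.2.1 + 1 else if planet.2.1 > other.2.1 then a.2.1 - 1 else a.2.1,
   if planet.2.2 < other.2.2 then a.2.2 + 1 else if planet.2.2 > other.2.2 then a.2.2 - 1 else a.2.2)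

def compute_accels (planets : List (Int × Int × Int)) : List (Int × Int × Int) :=
  (PySem.List.enumerate planets).foldl
    (fun accels ip =>
      accels ++ [(PySem.List.slice planets none (some ip.1) ++
                  PySem.List.slice planets (some (ip.1 + 1)) none).foldl (pvStepA ip.2) (0, 0, 0)])
    []

-- ===== PORT B =====
-- port of B's groupby loop over the sorted axis: one group = head :: takeWhile (== head)
def pvAxisGo (n : Int) : List Int → Int → PySem.Dict Int Int → PySem.Dict Int Int
  | [], _, g => g
  | v :: rest, i, g =>
      let j := i + 1 + ((rest.takeWhile (fun x => x == v)).length : Int)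
      pvAxisGo n (rest.dropWhile (fun x => x == v)) j (g.insert v ((n - j) - i))
termination_by s => s.length
decreasing_by
  exact Nat.lt_succ_of_le (List.length_dropWhile_le _ _)

def pvAxisAccel (vals : List Int) : PySem.Dict Int Int :=
  pvAxisGo (PySem.List.len vals) (PySem.List.sorted vals (fun x => x) false) 0 PySem.Dict.empty

def compute_accels_alt (planets : List (Int × Int × Int)) : List (Int × Int × Int) :=
  let gx := pvAxisAccel (planets.map (·.1))
  let gy := pvAxisAccel (planets.map (·.2.1))
  let gz := pvAxisAccel (planets.map (·.2.2))
  planets.map (fun p => (gx.getD p.1 0, gy.getD p.2.1 0, gz.getD p.2.2 0))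

-- ===== PRECONDITION & SPEC =====
def Spec_compute_accels (planets : List (Int × Int × Int)) (out : List (Int × Int × Int)) : Prop := out = compute_accels_alt planets
instance (planets : List (Int × Int × Int)) (out : List (Int × Int × Int)) : Decidable (Spec_compute_accels planets out) := by unfold Spec_compute_accels; infer_instance

-- ===== CLAIM (what is proved, stated in full; the proofs are below) =====
def Claim_equal_compute_accels : Prop := ∀ (planets : List (Int × Int × Int)), Dom_compute_accels planets → Spec_compute_accels planets (compute_accels planets)

-- ===== LEMMAS AND PROOFS =====

-- (count of strictly greater) - (count of strictly less) of v in xs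
def pvG (v : Int) (xs : List Int) : Int :=
  ((xs.countP (fun x => v < x)) : Int) - ((xs.countP (fun x => x < v)) : Int)

theorem pvStepA_fold (p : Int × Int × Int) (others : List (Int × Int × Int)) (a : Int × Int × Int) :
    others.foldl (pvStepA p) a =
      (a.1 + pvG p.1 (others.map (·.1)),
       a.2.1 + pvG p.2.1 (others.map (·.2.1)),
       a.2.2 + pvG p.2.2 (others.map (·.2.2))) := by
  induction others generalizing a with
  | nil => simp [pvG]
  | cons o t ih =>
    rw [List.foldl_cons, ih]
    simp only [pvG, List.map_cons, List.countP_cons, pvStepA, decide_eq_true_eq]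
    simp only [Prod.mk.injEq]
    refine ⟨?_, ?_, ?_⟩ <;> (split_ifs <;> push_cast <;> omega)

theorem pvG_eraseIdx (xs : List Int) (k : Nat) (h : k < xs.length) :
    pvG xs[k] (xs.eraseIdx k) = pvG xs[k] xs := by
  have hsplit : xs.take k ++ xs[k] :: xs.drop (k + 1) = xs := by
    rw [List.getElem_cons_drop h, List.take_append_drop]
  have hcount : ∀ q : Int → Bool,
      xs.countP q = (xs.take k).countP q + ((if q xs[k] then 1 else 0) + (xs.drop (k + 1)).countP q) := by
    intro q
    conv_lhs => rw [← hsplit]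
    rw [List.countP_append, List.countP_cons]
    cases hq : q xs[k] <;> simp [hq] <;> omega
  unfold pvG
  rw [List.eraseIdx_eq_take_drop_succ, List.countP_append, List.countP_append,
      hcount (fun x => decide (xs[k] < x)), hcount (fun x => decide (x < xs[k]))]
  simp

-- the first element a dropWhile keeps fails the test
theorem pvDropWhile_cons_not {p : Int → Bool} :
    ∀ (l : List Int) {y : Int} {ys : List Int}, l.dropWhile p = y :: ys → p y = false := by
  intro l
  induction l with
  | nil => intro y ys h; simp [List.dropWhile] at h
  | cons a t ih =>
    intro y ys h
    rw [List.dropWhile_cons] at h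
    by_cases hp : p a
    · exact ih (by simpa [hp] using h)
    · simp only [hp] at h
      simp only [Bool.false_eq_true, if_false, List.cons.injEq] at h
      rw [← h.1]
      simpa using hp

theorem pvAxisGo_get? (n : Int) (m : Nat) : ∀ (s : List Int), s.length ≤ m → s.Pairwise (· ≤ ·) →
    ∀ (i : Int) (g : PySem.Dict Int Int) (v : Int),
    (pvAxisGo n s i g).get? v =
      if v ∈ s then
        some ((n - (i + ((s.countP (fun x => x ≤ v)) : Int))) - (i + ((s.countP (fun x => x < v)) : Int)))
      else g.get? v := by
  induction m with
  | zero =>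
    intro s hlen hs i g v
    cases s with
    | nil => simp [pvAxisGo]
    | cons a t => simp at hlen
  | succ m ih =>
    intro s hlen hs i g v
    cases s with
    | nil => simp [pvAxisGo]
    | cons v0 rest =>
      rw [List.pairwise_cons] at hs
      obtain ⟨hv0le, hpw⟩ := hs
      simp only [pvAxisGo]
      generalize hG : rest.takeWhile (fun x => x == v0) = grp
      generalize hD : rest.dropWhile (fun x => x == v0) = d
      have hrest : grp ++ d = rest := by rw [← hG, ← hD]; exact List.takeWhile_append_dropWhile
      have hgrp : ∀ x ∈ grp, x = v0 := by
        intro x hx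
        rw [← hG] at hx
        simpa using List.mem_takeWhile_imp hx
      have hdsub : d.Sublist rest := by rw [← hD]; exact List.dropWhile_sublist _
      have hdpw : d.Pairwise (· ≤ ·) := hpw.sublist hdsub
      have hdgt : ∀ x ∈ d, v0 < x := by
        intro x hx
        cases hd : d with
        | nil => rw [hd] at hx; simp at hx
        | cons d0 d' =>
          have hne : (d0 == v0) = false :=
            pvDropWhile_cons_not (p := fun x => x == v0) rest (by rw [hD, hd])
          have h1 : v0 ≤ d0 := hv0le d0 (hdsub.subset (hd ▸ List.mem_cons_self))
          have h2 : v0 < d0 := lt_of_le_of_ne h1 (fun he => by simp [he.symm] at hne)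
          rw [hd] at hx
          rcases List.mem_cons.mp hx with h | h
          · rw [h]; exact h2
          · have hdpw' := hd ▸ hdpw
            rw [List.pairwise_cons] at hdpw'
            exact lt_of_lt_of_le h2 (hdpw'.1 x h)
      have hlend : d.length ≤ m := by
        have h1 : d.length ≤ rest.length := by rw [← hD]; exact List.length_dropWhile_le _ _
        simp only [List.length_cons] at hlen
        omega
      rw [ih d hlend hdpw]
      by_cases hvv0 : v = v0
      · subst hvv0
        rw [if_neg (fun hx => absurd (hdgt v hx) (lt_irrefl v)), if_pos List.mem_cons_self,
            PySem.Dict.get?_insert_self]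
        have c1 : (v :: rest).countP (fun x => x ≤ v) = 1 + grp.length := by
          rw [List.countP_cons, ← hrest, List.countP_append,
              List.countP_eq_length.mpr (fun x hx => by rw [hgrp x hx]; simp),
              List.countP_eq_zero.mpr (fun x hx => by simpa [not_le] using hdgt x hx)]
          simp <;> omega
        have c2 : (v :: rest).countP (fun x => x < v) = 0 := by
          rw [List.countP_eq_zero]
          intro x hx
          have hx' : x = v ∨ v < x := by
            rcases List.mem_cons.mp hx with h | h
            · exact Or.inl h
            · rw [← hrest] at h
              rcases List.mem_append.mp h with h | h
              · exact Or.inl (hgrp x h)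
              · exact Or.inr (hdgt x h)
          simp only [decide_eq_true_eq]
          rcases hx' with h | h <;> omega
        rw [c1, c2]
        congr 1
        push_cast
        ring
      · by_cases hvd : v ∈ d
        · have hv0v : v0 < v := hdgt v hvd
          have hmem : v ∈ v0 :: rest := by
            rw [← hrest]
            exact List.mem_cons_of_mem _ (List.mem_append_right _ hvd)
          rw [if_pos hvd, if_pos hmem]
          have c1 : (v0 :: rest).countP (fun x => x ≤ v) = 1 + grp.length + d.countP (fun x => x ≤ v) := by
            rw [List.countP_cons, ← hrest, List.countP_append,
                List.countP_eq_length.mpr (fun x hx => by rw [hgrp x hx]; simp [hv0v.le])]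
            simp [hv0v.le] <;> omega
          have c2 : (v0 :: rest).countP (fun x => x < v) = 1 + grp.length + d.countP (fun x => x < v) := by
            rw [List.countP_cons, ← hrest, List.countP_append,
                List.countP_eq_length.mpr (fun x hx => by rw [hgrp x hx]; simp [hv0v])]
            simp [hv0v] <;> omega
          rw [c1, c2]
          congr 1
          push_cast
          ring
        · have hmem : v ∉ v0 :: rest := by
            intro hx
            rcases List.mem_cons.mp hx with h | h
            · exact hvv0 h
            · rw [← hrest] at h
              rcases List.mem_append.mp h with h | h
              · exact hvv0 (hgrp v h)
              · exact hvd h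
          rw [if_neg hvd, if_neg hmem, PySem.Dict.get?_insert]
          simp [hvv0]

theorem pvAxisAccel_getD (vals : List Int) (v : Int) (hv : v ∈ vals) :
    (pvAxisAccel vals).getD v 0 = pvG v vals := by
  have hp' : (PySem.List.sorted vals (fun x => x) false).Pairwise (· ≤ ·) := by
    simpa using PySem.List.sorted_pairwise vals (fun x => x)
  have hperm : (PySem.List.sorted vals (fun x => x) false).Perm vals :=
    PySem.List.sorted_perm _ _ _
  have hmem : v ∈ PySem.List.sorted vals (fun x => x) false := by
    rw [PySem.List.mem_sorted]; exact hv
  unfold pvAxisAccel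
  rw [PySem.Dict.getD_eq_get?_getD,
      pvAxisGo_get? (PySem.List.len vals) (PySem.List.sorted vals (fun x => x) false).length _
        le_rfl hp', if_pos hmem]
  simp only [Option.getD_some]
  rw [hperm.countP_eq, hperm.countP_eq]
  have hlen : vals.length = vals.countP (fun x => x ≤ v) + vals.countP (fun x => v < x) := by
    rw [List.length_eq_countP_add_countP (p := fun x => decide (x ≤ v))]
    congr 1
    apply List.countP_congr
    intro a _
    simp [not_le]
  unfold pvG
  rw [PySem.List.len_eq]
  omega

-- one axis of the final goal: A's sign-sum over the others equals B's dict lookup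
theorem pvAxis_component (planets : List (Int × Int × Int)) (f : (Int × Int × Int) → Int)
    (k : Nat) (h : k < planets.length) :
    pvG (f planets[k]) ((planets.eraseIdx k).map f) =
      (pvAxisAccel (planets.map f)).getD (f planets[k]) 0 := by
  have hk' : k < (planets.map f).length := by simpa using h
  calc pvG (f planets[k]) ((planets.eraseIdx k).map f)
      = pvG ((planets.map f)[k]) ((planets.map f).eraseIdx k) := by
        rw [List.eraseIdx_map]; congr 1; simp
    _ = pvG ((planets.map f)[k]) (planets.map f) := pvG_eraseIdx _ k hk'
    _ = (pvAxisAccel (planets.map f)).getD ((planets.map f)[k]) 0 :=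
        (pvAxisAccel_getD _ _ (List.getElem_mem hk')).symm
    _ = (pvAxisAccel (planets.map f)).getD (f planets[k]) 0 := by congr 1; simp

-- ===== VERDICT (by name: the statement is the Claim_ definition above) =====
theorem compute_accels_spec : Claim_equal_compute_accels := by
  intro planets _
  unfold Spec_compute_accels
  simp only [compute_accels, compute_accels_alt]
  rw [PySem.List.foldl_append_singleton_eq_map]
  apply List.ext_getElem
  · simp [PySem.List.length_enumerate]
  intro k h1 h2
  have hk : k < planets.length := by simpa [PySem.List.length_enumerate] using h1
  simp only [List.nil_append, List.getElem_map, PySem.List.getElem_enumerate, zero_add]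
  rw [show ((k : Int) + 1) = ((k + 1 : Nat) : Int) by push_cast; ring,
      PySem.List.slice_to_natCast, PySem.List.slice_from_natCast,
      ← List.eraseIdx_eq_take_drop_succ, pvStepA_fold]
  simp only [zero_add]
  rw [pvAxis_component planets (·.1) k hk, pvAxis_component planets (·.2.1) k hk,
      pvAxis_component planets (·.2.2) k hk]
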